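-- pv_equiv track=rewrite | github.com/roshan2024nar/work_task | task1.py | find_sum_list
-- ===== SOURCE A (Python) =====
-- def find_sum_list(input_list: list, target: int):
--     """
--     A function to find the starting and ending indices of a sublist from the given input list that sums up to the target value.
--
--     Args:
--             input_list (list) : The input list of integers.
--
--             target (int) : The target value.
--
--     Returns:
--
--             list : A list containing the start and ending indices of the sublist that sums up to "target"
--                    If no sublist is found, returns [-1,-1].
--
--     Examples:
--
--             >>> find_sum_list([4, 3, 5, 7, 8], 12)
--             [0,2]
--
--             >>> find_sum_list([1, 2, 3, 4], 17)
--             [-1,-1]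
--
--     """
--     for start_index in range(len(input_list)):
--
--         sum_values = 0
--
--         for end_index in range(start_index, len(input_list)):
--
--             sum_values += input_list[end_index]
--
--             if sum_values == target:
--                 return [start_index, end_index]
--
--     return [-1, -1]
-- ===== SOURCE B (Python) =====
-- def _bisect_left(a, x):
--     lo, hi = 0, len(a)
--     while lo < hi:
--         mid = (lo + hi) // 2
--         if a[mid] < x:
--             lo = mid + 1
--         else:
--             hi = mid
--     return lo
--
--
-- def find_sum_list(input_list: list, target: int):
--     # Prefix sums: sum(input_list[s..e]) == prefix[e+1] - prefix[s].
--     prefix = [0]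
--     for x in input_list:
--         prefix.append(prefix[-1] + x)
--     # Index every prefix value once: value -> ascending list of positions.
--     positions = {}
--     for i, p in enumerate(prefix):
--         positions.setdefault(p, []).append(i)
--     # For each start (in order), binary-search the smallest end position.
--     for start in range(len(input_list)):
--         idxs = positions.get(prefix[start] + target, [])
--         j = _bisect_left(idxs, start + 1)
--         if j < len(idxs):
--             return [start, idxs[j] - 1]
--     return [-1, -1]
-- ===== Notes on version B (the rewrite author's own statement) =====
-- stated objective: faster
-- what changed: A's nested start/end scan with a running sum is replaced by one pass of prefix sums, a dict indexing each prefix value to its ascending positions, and a binary search for the smallest valid end per start.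
import Mathlib
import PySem

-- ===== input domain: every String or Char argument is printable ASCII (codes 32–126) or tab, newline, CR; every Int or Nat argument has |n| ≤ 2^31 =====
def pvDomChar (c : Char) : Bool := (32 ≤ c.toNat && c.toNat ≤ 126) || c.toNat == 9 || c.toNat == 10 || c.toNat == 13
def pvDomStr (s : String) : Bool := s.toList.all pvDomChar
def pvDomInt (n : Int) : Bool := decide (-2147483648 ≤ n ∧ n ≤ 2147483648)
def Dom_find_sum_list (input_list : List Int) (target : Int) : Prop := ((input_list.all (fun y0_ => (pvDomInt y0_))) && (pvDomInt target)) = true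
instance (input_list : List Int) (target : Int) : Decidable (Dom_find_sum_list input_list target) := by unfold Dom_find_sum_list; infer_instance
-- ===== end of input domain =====

-- B replaces A's quadratic nested start/end scan by prefix sums indexed in a dict plus a binary
-- search for the smallest end position per start (same return value, O(n log n) algorithm).

-- ===== PORT A =====
-- inner loop: 'for end_index in range(start_index, len)': running sum, early return of end_index.
-- every index supplied by the range is < input_list.length, so getD is exactly Python's input_list[end_index].
def aScan (xs : List Int) (target : Int) (sum : Int) : List Nat → Option Nat
  | [] => none
  | e :: rest =>
    let sum' := sum + xs.getD e 0
    if sum' = target then some e else aScan xs target sum' rest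

def find_sum_list (input_list : List Int) (target : Int) : List Int :=
  match (List.range input_list.length).findSome? (fun start =>
      (aScan input_list target 0 (List.range' start (input_list.length - start))).map
        (fun e : Nat => [(start : Int), (e : Int)])) with
  | some r => r
  | none => [-1, -1]

-- ===== PORT B =====
-- 'prefix = [0]; for x in input_list: prefix.append(prefix[-1] + x)' — the running last element is the accumulator.
def bPrefixGo : List Int → Int → List Int
  | [], _ => []
  | x :: rest, last => (last + x) :: bPrefixGo rest (last + x)

def bPrefix (xs : List Int) : List Int := 0 :: bPrefixGo xs 0

-- 'for i, p in enumerate(prefix): positions.setdefault(p, []).append(i)'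
-- (setdefault-then-append is exactly Dict.modify with default []).
def bPositions (pfx : List Int) : PySem.Dict Int (List Int) :=
  (PySem.List.enumerate pfx).foldl (fun d ip => d.modify ip.2 [] (· ++ [ip.1])) PySem.Dict.empty

-- the hand-rolled _bisect_left loop; a.getD mid 0 is exact since lo < hi ≤ len(a) keeps mid in range.
def bBisect (a : List Int) (x : Int) (lo hi : Nat) : Nat :=
  if _h : lo < hi then
    let mid := (lo + hi) / 2
    if a.getD mid 0 < x then bBisect a x (mid + 1) hi else bBisect a x lo mid
  else lo
termination_by hi - lo
decreasing_by all_goals omega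

-- prefix.getD start 0 is exact: start < len(input_list) < len(prefix); idxs.getD j 0 is guarded by j < len(idxs).
def find_sum_list_alt (input_list : List Int) (target : Int) : List Int :=
  let pfx := bPrefix input_list
  let positions := bPositions pfx
  match (List.range input_list.length).findSome? (fun start =>
      let idxs := positions.getD (pfx.getD start 0 + target) []
      let j := bBisect idxs ((start : Int) + 1) 0 idxs.length
      if j < idxs.length then some [(start : Int), idxs.getD j 0 - 1] else none) with
  | some r => r
  | none => [-1, -1]

-- ===== PRECONDITION & SPEC =====
def Spec_find_sum_list (input_list : List Int) (target : Int) (out : List Int) : Prop := out = find_sum_list_alt input_list target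
instance (input_list : List Int) (target : Int) (out : List Int) : Decidable (Spec_find_sum_list input_list target out) := by unfold Spec_find_sum_list; infer_instance

-- ===== CLAIM (what is proved, stated in full; the proofs are below) =====
def Claim_equal_find_sum_list : Prop := ∀ (input_list : List Int) (target : Int), Dom_find_sum_list input_list target → Spec_find_sum_list input_list target (find_sum_list input_list target)

-- ===== LEMMAS AND PROOFS =====

-- prefix-sum abbreviation used by the proofs
def psum (xs : List Int) (i : Nat) : Int := (xs.take i).sum

theorem psum_succ (xs : List Int) (m : Nat) (h : m < xs.length) :
    psum xs (m + 1) = psum xs m + xs.getD m 0 := by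
  unfold psum
  rw [List.take_add_one, List.sum_append, List.getD_eq_getElem?_getD, List.getElem?_eq_getElem h]
  simp

-- A's inner loop finds the first end index e in the range with psum (e+1) = psum m + (target - sum).
theorem aScan_eq (xs : List Int) (t : Int) (k : Nat) : ∀ (m : Nat) (c : Int), m + k ≤ xs.length →
    aScan xs t c (List.range' m k)
      = (List.range' m k).find? (fun e => decide (psum xs (e + 1) = psum xs m + (t - c))) := by
  induction k with
  | zero => intro m c _; simp [aScan]
  | succ k ih =>
    intro m c hmk
    rw [List.range'_succ]
    simp only [aScan, List.find?_cons]
    have hm : m < xs.length := by omega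
    have hps := psum_succ xs m hm
    by_cases h : c + xs.getD m 0 = t
    · have h2 : psum xs (m + 1) = psum xs m + (t - c) := by rw [hps]; omega
      rw [if_pos h, decide_eq_true h2]
    · have h2 : ¬ (psum xs (m + 1) = psum xs m + (t - c)) := by rw [hps]; omega
      rw [if_neg h, decide_eq_false h2]
      show aScan xs t (c + xs.getD m 0) (List.range' (m + 1) k)
        = List.find? (fun e => decide (psum xs (e + 1) = psum xs m + (t - c))) (List.range' (m + 1) k)
      rw [ih (m + 1) (c + xs.getD m 0) (by omega)]
      have hpred : (fun e => decide (psum xs (e + 1) = psum xs (m + 1) + (t - (c + xs.getD m 0)))) = (fun e => decide (psum xs (e + 1) = psum xs m + (t - c))) := by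
        funext e; simp only [decide_eq_decide]; rw [hps]; constructor <;> intro <;> omega
      rw [hpred]
theorem findSome?_congr {α β : Type} (l : List α) (f g : α → Option β)
    (h : ∀ x ∈ l, f x = g x) : l.findSome? f = l.findSome? g := by
  induction l with
  | nil => rfl
  | cons x t ih =>
    simp only [List.findSome?_cons]
    rw [h x (by simp)]
    cases g x with
    | none => exact ih (fun y hy => h y (by simp [hy]))
    | some v => rfl

-- find? over a tail range = head of (filter over the full range, positions below a dropped)
theorem find?_range'_eq (q : Nat → Bool) (a k : Nat) :
    (List.range' a k).find? q
      = (((List.range (a + k)).filter q).dropWhile (fun e => decide (e < a))).head? := by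
  have hsplit : List.range (a + k) = List.range' 0 a ++ List.range' a k := by
    rw [List.range_eq_range', ← List.range'_append]
    simp
  rw [hsplit, List.filter_append, List.dropWhile_append]
  have h1 : ((List.range' 0 a).filter q).dropWhile (fun e => decide (e < a)) = [] := by
    rw [List.dropWhile_eq_nil_iff]
    intro i hi
    have := List.mem_range'.mp (List.mem_of_mem_filter hi)
    obtain ⟨j, hj, rfl⟩ := this
    simpa using by omega
  rw [h1]
  simp only [List.isEmpty_nil, if_true]
  have h2 : ((List.range' a k).filter q).dropWhile (fun e => decide (e < a))
      = (List.range' a k).filter q := by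
    rw [List.dropWhile_eq_self_iff]
    intro hl
    have hmem : ((List.range' a k).filter q)[0] ∈ (List.range' a k).filter q := List.getElem_mem hl
    have := List.mem_range'.mp (List.mem_of_mem_filter hmem)
    obtain ⟨j, hj, heq⟩ := this
    simp [heq]
  rw [h2, List.head?_filter]

theorem bPrefixGo_eq (xs : List Int) : ∀ (c : Int),
    bPrefixGo xs c = (List.range xs.length).map (fun i => c + psum xs (i + 1)) := by
  induction xs with
  | nil => intro c; simp [bPrefixGo]
  | cons x rest ih =>
    intro c
    simp only [bPrefixGo, List.length_cons, List.range_succ_eq_map, List.map_cons, List.map_map]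
    congr 1
    · simp [psum]
    · rw [ih (c + x)]
      apply List.map_congr_left
      intro i _
      simp [Function.comp, psum, Nat.succ_eq_add_one, List.take_succ_cons]
      ring

theorem bPrefix_eq (xs : List Int) :
    bPrefix xs = (List.range (xs.length + 1)).map (psum xs) := by
  rw [bPrefix, bPrefixGo_eq, List.range_succ_eq_map, List.map_cons, List.map_map]
  congr 1
  apply List.map_congr_left; intro i _; simp [Function.comp]

theorem bPrefix_getD (xs : List Int) (i : Nat) (h : i ≤ xs.length) :
    (bPrefix xs).getD i 0 = psum xs i := by
  rw [bPrefix_eq, List.getD_eq_getElem?_getD, List.getElem?_map, List.getElem?_range (by omega)]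
  rfl

theorem bPositions_getD (ps : List Int) (v : Int) :
    (bPositions ps).getD v []
      = ((List.range ps.length).filter (fun j => ps.getD j 0 == v)).map (fun j : Nat => (j : Int)) := by
  unfold bPositions
  rw [PySem.List.enumerate_eq_map_pyRange ps 0]
  have hlen : PySem.List.len ps = (ps.length : Int) := by simp [PySem.List.len]
  rw [hlen, PySem.List.pyRange_zero_natCast, List.map_map, List.foldl_map]
  have heq := PySem.List.foldl_congr_mem
    (l := List.range ps.length) (init := (PySem.Dict.empty : PySem.Dict Int (List Int)))
    (f := fun x y => x.modify (((fun j => (j, PySem.List.pyGetD ps j 0)) ∘ fun k : Nat => (k : Int)) y).2 []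
      fun z => z ++ [(((fun j => (j, PySem.List.pyGetD ps j 0)) ∘ fun k : Nat => (k : Int)) y).1])
    (g := fun d j => d.modify (ps.getD j 0) [] (fun z => z ++ [(j : Int)]))
    (by intro acc j _; simp [Function.comp, PySem.List.pyGetD_natCast])
  rw [heq]
  have h2 : (List.range ps.length).foldl
      (fun d j => d.modify (ps.getD j 0) [] (fun z => z ++ [(j : Int)])) PySem.Dict.empty
      = ((List.range ps.length).map (fun j => (ps.getD j 0, (j : Int)))).foldl
          (fun d p => d.modify p.1 [] (fun z => z ++ [p.2])) PySem.Dict.empty := by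
    rw [List.foldl_map]
  rw [h2, PySem.Dict.getD_foldl_modify_append, List.filter_map, List.map_map]
  simp [Function.comp_def, List.map_eq_flatMap]

-- dropWhile of a list whose first r elements satisfy p and whose r-th does not is drop r
theorem dropWhile_eq_drop_of (a : List Int) (p : Int → Bool) : ∀ (r : Nat), r ≤ a.length →
    (∀ i, i < r → i < a.length → p (a.getD i 0)) → (∀ _h : r < a.length, ¬ p (a.getD r 0)) →
    a.dropWhile p = a.drop r := by
  induction a with
  | nil => intro r hr _ _; simp_all
  | cons x t ih =>
    intro r hr h1 h2
    cases r with
    | zero =>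
      have := h2 (by simp)
      simp only [List.getD_cons_zero] at this
      simp [this]
    | succ r' =>
      have hx : p x := by have := h1 0 (by omega) (by simp); simpa using this
      simp only [List.dropWhile_cons, hx, if_true, List.drop_succ_cons]
      exact ih r' (by simpa using hr)
        (fun i hi hlen => by have := h1 (i+1) (by omega) (by simpa using hlen); simpa using this)
        (fun hlt => by have := h2 (by simpa using hlt); simpa using this)

theorem getD_mono (a : List Int) (hs : a.Pairwise (· ≤ ·)) (i j : Nat) (hij : i ≤ j)
    (hj : j < a.length) : a.getD i 0 ≤ a.getD j 0 := by
  rcases eq_or_lt_of_le hij with rfl | hlt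
  · exact le_refl _
  · have := (List.pairwise_iff_getElem.mp hs) i j (by omega) hj hlt
    rw [List.getD_eq_getElem?_getD, List.getD_eq_getElem?_getD,
      List.getElem?_eq_getElem (by omega : i < a.length), List.getElem?_eq_getElem hj]
    simpa using this

theorem bBisect_inv (a : List Int) (x : Int) (hs : a.Pairwise (· ≤ ·)) :
    ∀ (lo hi : Nat), hi ≤ a.length → lo ≤ hi →
    (∀ i, i < lo → i < a.length → a.getD i 0 < x) →
    (∀ i, hi ≤ i → i < a.length → x ≤ a.getD i 0) →
    bBisect a x lo hi ≤ a.length ∧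
      (∀ i, i < bBisect a x lo hi → i < a.length → a.getD i 0 < x) ∧
      (∀ i, bBisect a x lo hi ≤ i → i < a.length → x ≤ a.getD i 0) := by
  intro lo hi
  induction lo, hi using bBisect.induct a x with
  | case1 lo hi hlt mid hmlt ih =>
    intro hhi hlohi hbelow habove
    have hmid : mid = (lo + hi) / 2 := rfl
    rw [bBisect, dif_pos hlt, if_pos (show a.getD ((lo + hi) / 2) 0 < x from hmlt)]
    apply ih hhi (by omega)
    · intro i hi1 hi2
      calc a.getD i 0 ≤ a.getD mid 0 := getD_mono a hs i mid (by omega) (by omega)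
        _ < x := hmlt
    · exact habove
  | case2 lo hi hlt mid hge ih =>
    intro hhi hlohi hbelow habove
    have hmid : mid = (lo + hi) / 2 := rfl
    rw [bBisect, dif_pos hlt, if_neg (show ¬ a.getD ((lo + hi) / 2) 0 < x from hge)]
    apply ih (by omega) (by omega) hbelow
    intro i hi1 hi2
    calc x ≤ a.getD mid 0 := not_lt.mp hge
      _ ≤ a.getD i 0 := getD_mono a hs mid i (by omega) hi2
  | case3 lo hi hge =>
    intro hhi hlohi hbelow habove
    rw [bBisect, dif_neg hge]
    refine ⟨by omega, fun i h1 h2 => hbelow i h1 h2, fun i h1 h2 => habove i (by omega) h2⟩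

theorem bBisect_dropWhile (a : List Int) (x : Int) (hs : a.Pairwise (· ≤ ·)) :
    a.dropWhile (fun v => decide (v < x)) = a.drop (bBisect a x 0 a.length) ∧
      bBisect a x 0 a.length ≤ a.length := by
  obtain ⟨h1, h2, h3⟩ := bBisect_inv a x hs 0 a.length le_rfl (by omega)
    (by omega) (fun i hi hlen => by omega)
  refine ⟨dropWhile_eq_drop_of a _ _ h1 (fun i hi hlen => by simpa using h2 i hi hlen)
    (fun hlt => by simpa using not_lt.mpr (h3 _ le_rfl hlt)), h1⟩

theorem bPrefix_length (xs : List Int) : (bPrefix xs).length = xs.length + 1 := by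
  rw [bPrefix_eq]; simp

theorem bif_map (L : List Int) (x sI : Int) (hsort : L.Pairwise (· ≤ ·)) :
    (if bBisect L x 0 L.length < L.length
        then some [sI, L.getD (bBisect L x 0 L.length) 0 - 1] else none)
      = (L.dropWhile (fun v => decide (v < x))).head?.map (fun v => [sI, v - 1]) := by
  obtain ⟨hdw, hjle⟩ := bBisect_dropWhile L x hsort
  rw [hdw]
  by_cases hlt : bBisect L x 0 L.length < L.length
  · rw [if_pos hlt, List.head?_drop, List.getElem?_eq_getElem hlt,
      List.getD_eq_getElem?_getD, List.getElem?_eq_getElem hlt]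
    rfl
  · rw [if_neg hlt, List.drop_eq_nil_of_le (by omega)]
    rfl

theorem per_start (xs : List Int) (t : Int) (s : Nat) (hs : s < xs.length) :
    (aScan xs t 0 (List.range' s (xs.length - s))).map (fun e : Nat => [(s : Int), (e : Int)])
      = (let idxs := (bPositions (bPrefix xs)).getD ((bPrefix xs).getD s 0 + t) []
         let j := bBisect idxs ((s : Int) + 1) 0 idxs.length
         if j < idxs.length then some [(s : Int), idxs.getD j 0 - 1] else none) := by
  -- B's idxs, computed down to a filtered range
  have hidx : (bPositions (bPrefix xs)).getD ((bPrefix xs).getD s 0 + t) []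
      = ((List.range (xs.length + 1)).filter
          (fun p => decide (psum xs p = psum xs s + t))).map (fun p : Nat => (p : Int)) := by
    rw [bPrefix_getD xs s (le_of_lt hs), bPositions_getD, bPrefix_length]
    apply congrArg
    apply List.filter_congr
    intro p hp
    rw [bPrefix_getD xs p (by simpa using Nat.lt_succ_iff.mp (List.mem_range.mp hp))]
    rfl
  have hsort : (((List.range (xs.length + 1)).filter
        (fun p => decide (psum xs p = psum xs s + t))).map (fun p : Nat => (p : Int))).Pairwise (· ≤ ·) := by
    refine List.pairwise_map.mpr ?_
    refine List.Pairwise.imp ?_ (List.Pairwise.sublist List.filter_sublist List.pairwise_lt_range)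
    intro a b h
    exact_mod_cast le_of_lt h
  simp only [hidx]
  rw [bif_map _ ((s : Int) + 1) (s : Int) hsort]
  -- A side
  rw [aScan_eq xs t (xs.length - s) s 0 (by omega),
    find?_range'_eq (fun e => decide (psum xs (e + 1) = psum xs s + (t - 0))) s (xs.length - s),
    (by omega : s + (xs.length - s) = xs.length)]
  -- push the dropWhile through the cast map
  rw [List.dropWhile_map]
  have hpred1 : ((fun v => decide (v < (s : Int) + 1)) ∘ (fun p : Nat => (p : Int)))
      = (fun p : Nat => decide (p < s + 1)) := by
    funext p; simp only [Function.comp, decide_eq_decide]; constructor <;> intro <;> omega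
  rw [hpred1, List.head?_map, Option.map_map]
  -- split off position 0 and shift indices by one
  have hsplit : (List.range (xs.length + 1)).filter (fun p => decide (psum xs p = psum xs s + t))
      = ((if psum xs 0 = psum xs s + t then [0] else []) ++
         ((List.range xs.length).filter
            (fun e => decide (psum xs (e + 1) = psum xs s + t))).map Nat.succ) := by
    rw [List.range_succ_eq_map, List.filter_cons, List.filter_map]
    have hpred2 : ((fun p => decide (psum xs p = psum xs s + t)) ∘ Nat.succ)
        = (fun e => decide (psum xs (e + 1) = psum xs s + t)) := by
      funext e; simp [Function.comp, Nat.succ_eq_add_one]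
    rw [hpred2]
    by_cases h0 : psum xs 0 = psum xs s + t
    · rw [if_pos (by simpa using h0), if_pos h0]; rfl
    · rw [if_neg (by simpa using h0), if_neg h0]; rfl
  rw [hsplit, List.dropWhile_append]
  have hzero : ((if psum xs 0 = psum xs s + t then [0] else ([] : List Nat)).dropWhile
      (fun p => decide (p < s + 1))).isEmpty = true := by
    by_cases h0 : psum xs 0 = psum xs s + t
    · rw [if_pos h0]; simp [List.dropWhile]
    · rw [if_neg h0]; simp
  rw [if_pos hzero, List.dropWhile_map]
  have hpred3 : ((fun p : Nat => decide (p < s + 1)) ∘ Nat.succ) = (fun e : Nat => decide (e < s)) := by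
    funext e; simp only [Function.comp, Nat.succ_eq_add_one, decide_eq_decide]; omega
  have hpred4 : (fun e => decide (psum xs (e + 1) = psum xs s + (t - 0)))
      = (fun e => decide (psum xs (e + 1) = psum xs s + t)) := by
    funext e; simp
  rw [hpred3, hpred4, List.head?_map, Option.map_map]
  refine congrFun (congrArg Option.map ?_) _
  funext e
  simp only [Function.comp, Nat.succ_eq_add_one]
  push_cast
  ring_nf

-- ===== VERDICT (by name: the statement is the Claim_ definition above) =====
theorem find_sum_list_spec : Claim_equal_find_sum_list := by
  intro input_list target _
  unfold Spec_find_sum_list find_sum_list find_sum_list_alt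
  rw [findSome?_congr (List.range input_list.length)
    (fun start => (aScan input_list target 0
        (List.range' start (input_list.length - start))).map
      (fun e : Nat => [(start : Int), (e : Int)]))
    (fun start =>
      let idxs := (bPositions (bPrefix input_list)).getD
        ((bPrefix input_list).getD start 0 + target) []
      let j := bBisect idxs ((start : Int) + 1) 0 idxs.length
      if j < idxs.length then some [(start : Int), idxs.getD j 0 - 1] else none)
    (fun s hsmem => per_start input_list target s (List.mem_range.mp hsmem))]
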